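-- pv_equiv track=rewrite | github.com/williampiat3/AdventOfCode24 | 7/prog.py | build_expr
-- ===== SOURCE A (Python) =====
-- def build_expr(sequence,operations,seed=None):
-- 	if not seed:
-- 		seed = operations[0]+f"({sequence[0]},{sequence[1]})"
-- 		if len(sequence)==2:
-- 			return seed
-- 		else:
-- 			return build_expr(sequence[2:],operations[1:],seed=seed)
--
-- 	else:
-- 		if len(sequence)==1:
-- 			return operations[0]+f"({seed},{sequence[0]})"
-- 		else:
-- 			return build_expr(sequence[1:],operations[1:],seed=operations[0]+f"({seed},{sequence[0]})")
-- ===== SOURCE B (Python) =====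
-- def build_expr(sequence, operations, seed=None):
--     if not seed:
--         acc = operations[0] + f"({sequence[0]},{sequence[1]})"
--         rest = sequence[2:]
--         ops = operations[1:]
--     else:
--         acc = seed
--         rest = sequence
--         ops = operations
--     for op, x in zip(ops, rest):
--         acc = op + f"({acc},{x})"
--     return acc
-- ===== Notes on version B (the rewrite author's own statement) =====
-- stated objective: faster
-- what changed: The tail recursion (which re-slices sequence and operations on every call) is replaced by a single accumulator loop over zip(operations, remaining sequence), with the unseeded case handled once up front.
import Mathlib
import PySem

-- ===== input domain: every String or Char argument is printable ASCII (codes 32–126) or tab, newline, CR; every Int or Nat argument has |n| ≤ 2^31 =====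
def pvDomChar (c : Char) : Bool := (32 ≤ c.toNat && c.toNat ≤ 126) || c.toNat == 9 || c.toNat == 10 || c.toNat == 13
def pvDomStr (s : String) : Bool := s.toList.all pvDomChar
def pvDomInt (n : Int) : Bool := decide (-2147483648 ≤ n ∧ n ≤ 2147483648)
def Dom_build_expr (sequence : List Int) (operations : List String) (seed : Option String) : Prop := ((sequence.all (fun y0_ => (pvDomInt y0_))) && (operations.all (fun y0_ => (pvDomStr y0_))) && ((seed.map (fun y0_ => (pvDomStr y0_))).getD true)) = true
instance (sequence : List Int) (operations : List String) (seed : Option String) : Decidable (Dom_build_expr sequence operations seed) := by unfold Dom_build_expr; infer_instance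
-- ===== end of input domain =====

-- B replaces A's tail recursion by one accumulator loop over zip(operations, remaining sequence) (objective: simpler).

-- ===== PORT A =====
-- Literal transliteration of A's tail recursion: 'not seed' is 'seed = none ∨ seed = some ""'.
-- Every seed A passes to a recursive call is nonempty (it contains "("), so the recursion with a
-- seed is the else branch of A, transcribed as the helper build_expr_go (len==1 check first, as in A).
-- Out-of-range indexing (outside Pre_) returns "" to make the function total.
def build_expr_go (sequence : List Int) (operations : List String) (s : String) : String :=
  match sequence, operations with
  | [x], op :: _ => op ++ "(" ++ s ++ "," ++ PySem.Int.toStr x ++ ")"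
  | x :: y :: rest, op :: ops => build_expr_go (y :: rest) ops (op ++ "(" ++ s ++ "," ++ PySem.Int.toStr x ++ ")")
  | _, _ => ""

def build_expr (sequence : List Int) (operations : List String) (seed : Option String) : String :=
  if seed = none ∨ seed = some "" then
    match sequence, operations with
    | a :: b :: rest, op :: ops =>
      let s := op ++ "(" ++ PySem.Int.toStr a ++ "," ++ PySem.Int.toStr b ++ ")"
      if rest = [] then s else build_expr_go rest ops s
    | _, _ => ""
  else
    build_expr_go sequence operations (seed.getD "")

-- ===== PORT B =====
-- Transliteration of Source B: set up (acc, rest, ops) once, then fold the step over zip ops rest.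
def build_expr_alt (sequence : List Int) (operations : List String) (seed : Option String) : String :=
  let (acc, rest, ops) :=
    if seed = none ∨ seed = some "" then
      match sequence, operations with
      | a :: b :: r, op :: os =>
        (op ++ "(" ++ PySem.Int.toStr a ++ "," ++ PySem.Int.toStr b ++ ")", r, os)
      | _, _ => ("", [], [])   -- indexing outside Pre_; total guard
    else
      (seed.getD "", sequence, operations)
  (ops.zip rest).foldl (fun acc p => p.1 ++ "(" ++ acc ++ "," ++ PySem.Int.toStr p.2 ++ ")") acc

-- ===== PRECONDITION & SPEC =====
-- Pre_ excludes exactly the inputs where A raises IndexError: with no (or empty) seed it needs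
-- at least 2 elements and len(sequence)-1 operations; with a seed, at least 1 element and
-- len(sequence) operations.
def Pre_build_expr (sequence : List Int) (operations : List String) (seed : Option String) : Prop :=
  if seed = none ∨ seed = some "" then
    2 ≤ sequence.length ∧ sequence.length - 1 ≤ operations.length
  else
    1 ≤ sequence.length ∧ sequence.length ≤ operations.length
instance (sequence : List Int) (operations : List String) (seed : Option String) : Decidable (Pre_build_expr sequence operations seed) := by unfold Pre_build_expr; infer_instance

def pvWitness_build_expr : List Int × List String × Option String := ([1, 2, 3], ["+", "*"], none)

def Spec_build_expr (sequence : List Int) (operations : List String) (seed : Option String) (out : String) : Prop := out = build_expr_alt sequence operations seed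
instance (sequence : List Int) (operations : List String) (seed : Option String) (out : String) : Decidable (Spec_build_expr sequence operations seed out) := by unfold Spec_build_expr; infer_instance

-- ===== CLAIM (what is proved, stated in full; the proofs are below) =====
def Claim_equal_build_expr : Prop := ∀ (sequence : List Int) (operations : List String) (seed : Option String), Dom_build_expr sequence operations seed → Pre_build_expr sequence operations seed → Spec_build_expr sequence operations seed (build_expr sequence operations seed)

-- ===== LEMMAS AND PROOFS =====

-- Loop invariant: on a nonempty remainder with enough operations,
-- A's seeded recursion computes B's fold.
theorem build_expr_loop (rest : List Int) (ops : List String) (s : String)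
    (hr : rest ≠ []) (hlen : rest.length ≤ ops.length) :
    build_expr_go rest ops s =
      (ops.zip rest).foldl (fun acc p => p.1 ++ "(" ++ acc ++ "," ++ PySem.Int.toStr p.2 ++ ")") s := by
  induction rest generalizing ops s with
  | nil => exact absurd rfl hr
  | cons x r ih =>
    cases ops with
    | nil => simp at hlen
    | cons op os =>
      cases r with
      | nil => rw [build_expr_go.eq_def]; simp
      | cons y t =>
        rw [build_expr_go.eq_def]
        simp only [List.zip_cons_cons, List.foldl_cons]
        exact ih os _ (by simp) (by simpa using Nat.le_of_succ_le_succ (by simpa using hlen))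

-- ===== VERDICT (by name: the statement is the Claim_ definition above) =====
theorem build_expr_spec : Claim_equal_build_expr := by
  intro sequence operations seed _ hpre
  unfold Spec_build_expr
  by_cases hseed : seed = none ∨ seed = some ""
  · unfold Pre_build_expr at hpre
    rw [if_pos hseed] at hpre
    obtain ⟨h2, hlen⟩ := hpre
    match sequence, operations with
    | a :: b :: rest, op :: ops =>
      rw [build_expr.eq_def, build_expr_alt]
      simp only [if_pos hseed]
      by_cases hre : rest = []
      · subst hre; simp
      · simp only [if_neg hre]
        exact build_expr_loop rest ops _ hre (by simpa using hlen)
    | a :: b :: rest, [] => simp at hlen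
  · unfold Pre_build_expr at hpre
    rw [if_neg hseed] at hpre
    obtain ⟨h1, hlen⟩ := hpre
    rw [build_expr.eq_def, build_expr_alt.eq_def]
    simp only [if_neg hseed]
    exact build_expr_loop sequence operations _ (by rintro rfl; simp at h1) hlen
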